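-- pv_equiv track=rewrite | github.com/Abhitvs/EEG-Epilepsy | src/loaders/dataset2_loader.py | identify_spectral_columns
-- ===== SOURCE A (Python) =====
-- from typing import Dict, List, Optional, Union, Tuple
--
-- def identify_spectral_columns(columns: List[str]) -> Dict[str, List[str]]:
--     """
--     Identify which columns represent spectral features.
--
--     Looks for columns containing frequency band names (delta, theta, alpha, beta, gamma)
--     and feature types (power, amplitude, energy, etc.).
--
--     Args:
--         columns: List of column names from the DataFrame.
--
--     Returns:
--         Dictionary mapping feature types to lists of column names.
--
--     Example:
--         >>> cols = ['ch1', 'alpha_power', 'beta_power', 'theta_energy']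
--         >>> identify_spectral_columns(cols)
--         {'alpha': ['alpha_power'], 'beta': ['beta_power'], 'theta': ['theta_energy']}
--     """
--     spectral_cols = {
--         'delta': [],
--         'theta': [],
--         'alpha': [],
--         'beta': [],
--         'gamma': [],
--         'other': [],
--     }
--
--     for col in columns:
--         col_lower = col.lower()
--
--         # Check for frequency bands
--         matched = False
--         for band in ['delta', 'theta', 'alpha', 'beta', 'gamma']:
--             if band in col_lower:
--                 spectral_cols[band].append(col)
--                 matched = True
--                 break
--
--         # Check for other spectral features
--         if not matched:
--             spectral_keywords = ['power', 'amplitude', 'energy', 'frequency', 'psd', 'spectral']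
--             if any(keyword in col_lower for keyword in spectral_keywords):
--                 spectral_cols['other'].append(col)
--
--     # Remove empty categories
--     spectral_cols = {k: v for k, v in spectral_cols.items() if v}
--
--     return spectral_cols
-- ===== SOURCE B (Python) =====
-- def identify_spectral_columns(columns):
--     """Band-first re-implementation: build each bucket with one filter pass."""
--     bands = ['delta', 'theta', 'alpha', 'beta', 'gamma']
--     keywords = ['power', 'amplitude', 'energy', 'frequency', 'psd', 'spectral']
--     result = {}
--     earlier = []
--     for band in bands:
--         bucket = [c for c in columns
--                   if band in c.lower()
--                   and not any(b in c.lower() for b in earlier)]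
--         if bucket:
--             result[band] = bucket
--         earlier.append(band)
--     other = [c for c in columns
--              if not any(b in c.lower() for b in bands)
--              and any(k in c.lower() for k in keywords)]
--     if other:
--         result['other'] = other
--     return result
-- ===== Notes on version B (the rewrite author's own statement) =====
-- stated objective: alternative
-- what changed: B inverts the loop nesting: instead of A's per-column dict mutation with an inner band loop and break, B iterates over the fixed band list, building each bucket with one filter pass (a column counts for a band only if no earlier band matches), then one final pass for 'other'; buckets are appended only if non-empty.
import Mathlib
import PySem

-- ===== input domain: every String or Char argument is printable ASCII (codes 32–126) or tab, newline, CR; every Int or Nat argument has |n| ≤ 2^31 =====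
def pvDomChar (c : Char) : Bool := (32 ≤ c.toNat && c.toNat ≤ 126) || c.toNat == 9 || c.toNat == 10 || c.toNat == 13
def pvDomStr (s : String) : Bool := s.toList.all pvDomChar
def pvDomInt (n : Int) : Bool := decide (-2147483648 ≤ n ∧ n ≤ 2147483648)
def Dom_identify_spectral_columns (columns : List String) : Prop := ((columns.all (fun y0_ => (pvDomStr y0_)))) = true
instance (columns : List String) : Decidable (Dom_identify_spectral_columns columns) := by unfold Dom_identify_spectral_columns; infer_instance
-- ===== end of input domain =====

-- B groups band-first (one filter pass per bucket) instead of A's per-column dict mutation: a different decomposition of the same cost (objective: alternative).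

-- ===== PORT A =====
-- 'for band in bands: if band in col_lower: append(col); matched = True; break'
def aBandLoop (bands : List String) (clower : String) (col : String)
    (d : PySem.Dict String (List String)) : PySem.Dict String (List String) × Bool :=
  match bands with
  | [] => (d, false)
  | b :: rest =>
      if PySem.Str.isIn b clower then (d.modify b [] (fun v => v ++ [col]), true)
      else aBandLoop rest clower col d

-- body of A's 'for col in columns' loop
def aStep (d : PySem.Dict String (List String)) (col : String) : PySem.Dict String (List String) :=
  let clower := PySem.Str.lower col
  let r := aBandLoop ["delta", "theta", "alpha", "beta", "gamma"] clower col d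
  if !r.2 then
    if (["power", "amplitude", "energy", "frequency", "psd", "spectral"]).any
        (fun k => PySem.Str.isIn k clower) then
      r.1.modify "other" [] (fun v => v ++ [col])
    else r.1
  else r.1

def identify_spectral_columns (columns : List String) : List (String × List String) :=
  let init : PySem.Dict String (List String) :=
    PySem.Dict.mk [("delta", []), ("theta", []), ("alpha", []), ("beta", []), ("gamma", []), ("other", [])]
  let d := columns.foldl aStep init
  -- '{k: v for k, v in spectral_cols.items() if v}'
  d.items.filter (fun p => !p.2.isEmpty)

-- ===== PORT B =====
-- body of B's 'for band in bands' loop; state = (result, earlier)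
def bStep (columns : List String)
    (st : List (String × List String) × List String) (band : String) :
    List (String × List String) × List String :=
  let bucket := columns.filter (fun c =>
    PySem.Str.isIn band (PySem.Str.lower c)
      && !(st.2.any (fun b => PySem.Str.isIn b (PySem.Str.lower c))))
  let result := if !bucket.isEmpty then st.1 ++ [(band, bucket)] else st.1
  (result, st.2 ++ [band])

def identify_spectral_columns_alt (columns : List String) : List (String × List String) :=
  let bands : List String := ["delta", "theta", "alpha", "beta", "gamma"]
  let keywords : List String := ["power", "amplitude", "energy", "frequency", "psd", "spectral"]
  let st := bands.foldl (bStep columns) ([], [])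
  let other := columns.filter (fun c =>
    !(bands.any (fun b => PySem.Str.isIn b (PySem.Str.lower c)))
      && keywords.any (fun k => PySem.Str.isIn k (PySem.Str.lower c)))
  if !other.isEmpty then st.1 ++ [("other", other)] else st.1

-- ===== PRECONDITION & SPEC =====
def Spec_identify_spectral_columns (columns : List String) (out : List (String × List String)) : Prop := out = identify_spectral_columns_alt columns
instance (columns : List String) (out : List (String × List String)) : Decidable (Spec_identify_spectral_columns columns out) := by unfold Spec_identify_spectral_columns; infer_instance

-- ===== CLAIM (what is proved, stated in full; the proofs are below) =====
def Claim_equal_identify_spectral_columns : Prop := ∀ (columns : List String), Dom_identify_spectral_columns columns → Spec_identify_spectral_columns columns (identify_spectral_columns columns)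

-- ===== LEMMAS AND PROOFS =====

-- the six bucket predicates (first matching band wins; 'other' = no band, some keyword)
def pB (b c : String) : Bool := PySem.Str.isIn b (PySem.Str.lower c)
def q1 (c : String) : Bool := pB "delta" c
def q2 (c : String) : Bool := pB "theta" c && !(pB "delta" c)
def q3 (c : String) : Bool := pB "alpha" c && !(pB "delta" c || pB "theta" c)
def q4 (c : String) : Bool := pB "beta" c && !(pB "delta" c || (pB "theta" c || pB "alpha" c))
def q5 (c : String) : Bool := pB "gamma" c && !(pB "delta" c || (pB "theta" c || (pB "alpha" c || pB "beta" c)))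
def q6 (c : String) : Bool :=
  !(pB "delta" c || (pB "theta" c || (pB "alpha" c || (pB "beta" c || pB "gamma" c))))
    && (["power", "amplitude", "energy", "frequency", "psd", "spectral"]).any
        (fun k => PySem.Str.isIn k (PySem.Str.lower c))

lemma modify_delta (v1 v2 v3 v4 v5 v6 : List String) (f : List String → List String) :
    (PySem.Dict.mk [("delta", v1), ("theta", v2), ("alpha", v3), ("beta", v4), ("gamma", v5), ("other", v6)]).modify "delta" [] f =
    PySem.Dict.mk [("delta", f v1), ("theta", v2), ("alpha", v3), ("beta", v4), ("gamma", v5), ("other", v6)] := by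
  simp [PySem.Dict.modify, PySem.Dict.insert, PySem.Dict.getD, PySem.Dict.get?, PySem.Dict.contains]

lemma modify_theta (v1 v2 v3 v4 v5 v6 : List String) (f : List String → List String) :
    (PySem.Dict.mk [("delta", v1), ("theta", v2), ("alpha", v3), ("beta", v4), ("gamma", v5), ("other", v6)]).modify "theta" [] f =
    PySem.Dict.mk [("delta", v1), ("theta", f v2), ("alpha", v3), ("beta", v4), ("gamma", v5), ("other", v6)] := by
  simp [PySem.Dict.modify, PySem.Dict.insert, PySem.Dict.getD, PySem.Dict.get?, PySem.Dict.contains]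

lemma modify_alpha (v1 v2 v3 v4 v5 v6 : List String) (f : List String → List String) :
    (PySem.Dict.mk [("delta", v1), ("theta", v2), ("alpha", v3), ("beta", v4), ("gamma", v5), ("other", v6)]).modify "alpha" [] f =
    PySem.Dict.mk [("delta", v1), ("theta", v2), ("alpha", f v3), ("beta", v4), ("gamma", v5), ("other", v6)] := by
  simp [PySem.Dict.modify, PySem.Dict.insert, PySem.Dict.getD, PySem.Dict.get?, PySem.Dict.contains]

lemma modify_beta (v1 v2 v3 v4 v5 v6 : List String) (f : List String → List String) :
    (PySem.Dict.mk [("delta", v1), ("theta", v2), ("alpha", v3), ("beta", v4), ("gamma", v5), ("other", v6)]).modify "beta" [] f =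
    PySem.Dict.mk [("delta", v1), ("theta", v2), ("alpha", v3), ("beta", f v4), ("gamma", v5), ("other", v6)] := by
  simp [PySem.Dict.modify, PySem.Dict.insert, PySem.Dict.getD, PySem.Dict.get?, PySem.Dict.contains]

lemma modify_gamma (v1 v2 v3 v4 v5 v6 : List String) (f : List String → List String) :
    (PySem.Dict.mk [("delta", v1), ("theta", v2), ("alpha", v3), ("beta", v4), ("gamma", v5), ("other", v6)]).modify "gamma" [] f =
    PySem.Dict.mk [("delta", v1), ("theta", v2), ("alpha", v3), ("beta", v4), ("gamma", f v5), ("other", v6)] := by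
  simp [PySem.Dict.modify, PySem.Dict.insert, PySem.Dict.getD, PySem.Dict.get?, PySem.Dict.contains]

lemma modify_other (v1 v2 v3 v4 v5 v6 : List String) (f : List String → List String) :
    (PySem.Dict.mk [("delta", v1), ("theta", v2), ("alpha", v3), ("beta", v4), ("gamma", v5), ("other", v6)]).modify "other" [] f =
    PySem.Dict.mk [("delta", v1), ("theta", v2), ("alpha", v3), ("beta", v4), ("gamma", v5), ("other", f v6)] := by
  simp [PySem.Dict.modify, PySem.Dict.insert, PySem.Dict.getD, PySem.Dict.get?, PySem.Dict.contains]

lemma aStep_eq (v1 v2 v3 v4 v5 v6 : List String) (c : String) :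
    aStep (PySem.Dict.mk [("delta", v1), ("theta", v2), ("alpha", v3), ("beta", v4), ("gamma", v5), ("other", v6)]) c =
    PySem.Dict.mk [("delta", if q1 c then v1 ++ [c] else v1),
                   ("theta", if q2 c then v2 ++ [c] else v2),
                   ("alpha", if q3 c then v3 ++ [c] else v3),
                   ("beta",  if q4 c then v4 ++ [c] else v4),
                   ("gamma", if q5 c then v5 ++ [c] else v5),
                   ("other", if q6 c then v6 ++ [c] else v6)] := by
  simp only [aStep, aBandLoop]
  by_cases h1 : pB "delta" c <;>
  by_cases h2 : pB "theta" c <;>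
  by_cases h3 : pB "alpha" c <;>
  by_cases h4 : pB "beta" c <;>
  by_cases h5 : pB "gamma" c <;>
    simp only [pB] at h1 h2 h3 h4 h5 <;>
    simp only [h1, h2, h3, h4, h5, if_true, if_false, Bool.not_true, Bool.not_false,
      Bool.false_eq_true, modify_delta, modify_theta, modify_alpha,
      modify_beta, modify_gamma, modify_other,
      q1, q2, q3, q4, q5, q6, pB, Bool.or_true, Bool.or_false,
      Bool.and_true, Bool.true_and, Bool.and_false, Bool.false_and] <;>
    split_ifs <;> simp_all

lemma foldA (cols : List String) (v1 v2 v3 v4 v5 v6 : List String) :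
    cols.foldl aStep (PySem.Dict.mk [("delta", v1), ("theta", v2), ("alpha", v3), ("beta", v4), ("gamma", v5), ("other", v6)]) =
    PySem.Dict.mk [("delta", v1 ++ cols.filter q1), ("theta", v2 ++ cols.filter q2),
                   ("alpha", v3 ++ cols.filter q3), ("beta", v4 ++ cols.filter q4),
                   ("gamma", v5 ++ cols.filter q5), ("other", v6 ++ cols.filter q6)] := by
  induction cols generalizing v1 v2 v3 v4 v5 v6 with
  | nil => simp
  | cons c t ih =>
      rw [List.foldl_cons, aStep_eq, ih]
      congr 1
      simp only [List.filter_cons]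
      split_ifs <;> simp

-- ===== VERDICT (by name: the statement is the Claim_ definition above) =====
set_option maxHeartbeats 1000000 in
theorem identify_spectral_columns_spec : Claim_equal_identify_spectral_columns := by
  intro columns _
  unfold Spec_identify_spectral_columns
  simp only [identify_spectral_columns, identify_spectral_columns_alt]
  rw [foldA]
  simp only [List.foldl_cons, List.foldl_nil, bStep, List.nil_append, List.filter_cons,
    List.filter_nil]
  unfold q1 q2 q3 q4 q5 q6 pB
  simp only [List.nil_append, List.cons_append, List.any_cons,
    List.any_nil, Bool.or_false, Bool.not_false, Bool.and_true]
  generalize List.filter (fun c => PySem.Str.isIn "delta" (PySem.Str.lower c)) columns = L1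
  generalize List.filter (fun c => PySem.Str.isIn "theta" (PySem.Str.lower c) && !PySem.Str.isIn "delta" (PySem.Str.lower c)) columns = L2
  generalize List.filter (fun c => PySem.Str.isIn "alpha" (PySem.Str.lower c) && !(PySem.Str.isIn "delta" (PySem.Str.lower c) || PySem.Str.isIn "theta" (PySem.Str.lower c))) columns = L3
  generalize List.filter (fun c => PySem.Str.isIn "beta" (PySem.Str.lower c) && !(PySem.Str.isIn "delta" (PySem.Str.lower c) || (PySem.Str.isIn "theta" (PySem.Str.lower c) || PySem.Str.isIn "alpha" (PySem.Str.lower c)))) columns = L4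
  generalize List.filter (fun c => PySem.Str.isIn "gamma" (PySem.Str.lower c) && !(PySem.Str.isIn "delta" (PySem.Str.lower c) || (PySem.Str.isIn "theta" (PySem.Str.lower c) || (PySem.Str.isIn "alpha" (PySem.Str.lower c) || PySem.Str.isIn "beta" (PySem.Str.lower c))))) columns = L5
  generalize List.filter (fun c => !(PySem.Str.isIn "delta" (PySem.Str.lower c) || (PySem.Str.isIn "theta" (PySem.Str.lower c) || (PySem.Str.isIn "alpha" (PySem.Str.lower c) || (PySem.Str.isIn "beta" (PySem.Str.lower c) || PySem.Str.isIn "gamma" (PySem.Str.lower c))))) && (PySem.Str.isIn "power" (PySem.Str.lower c) || (PySem.Str.isIn "amplitude" (PySem.Str.lower c) || (PySem.Str.isIn "energy" (PySem.Str.lower c) || (PySem.Str.isIn "frequency" (PySem.Str.lower c) || (PySem.Str.isIn "psd" (PySem.Str.lower c) || PySem.Str.isIn "spectral" (PySem.Str.lower c))))))) columns = L6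
  rcases L1 with _ | ⟨x1, t1⟩ <;> rcases L2 with _ | ⟨x2, t2⟩ <;> rcases L3 with _ | ⟨x3, t3⟩ <;>
    rcases L4 with _ | ⟨x4, t4⟩ <;> rcases L5 with _ | ⟨x5, t5⟩ <;> rcases L6 with _ | ⟨x6, t6⟩ <;> rfl
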